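-- pv_equiv track=rewrite | github.com/python-sem4-sv/Exam_Twitch_Clip_Automation | twitch_chat_bot.py | categorize_messages
-- ===== SOURCE A (Python) =====
-- emote_feelings = [
--     ("awesome", "Pog"), ("awesome", "PogU"), ("awesome", "POGGERS"), ("awesome", "PogChamp"),
--     ("funny", "LULW"), ("funny", "LUL"), ("funny", "OMEGALUL"), ("funny", "DuckerZ"),
--     ("sad", "PepeHands"), ("sad", "FeelsBadMan"),
--     ("cringe", "haHAA"),
--     ("racial", "Trihard"), ("racial", "KKona"),
--     ("scary", "monkaS"), ("scary", "monkaW"),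
--     ("sexy", "gachi"), ("sexy", "kreyGASM")
-- ]
--
-- def categorize_messages(message_list):
--     emote_category_count = {}
--     emote_count = {}
--     for msg in message_list:
--         split_msg = msg[1].split(' ')
--         for word in split_msg:
--             word = word.strip()
--             for index, emote in enumerate(emote_feelings):
--                 if emote[1] == word:
--                     current_emote = emote_count.get(emote[1], 0)
--                     emote_count[emote[1]] = current_emote + 1
--                     category = emote_category_count.get(emote[0], 0)
--                     emote_category_count[emote[0]] =  category + 1
--                     break
--                 elif index == len(emote_feelings) - 1:
--                     category = emote_category_count.get("Other", 0)
--                     emote_category_count["Other"] = category + 1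
--                     current_word = emote_count.get(word, 0)
--                     emote_count[word] = current_word + 1
--
--     return emote_category_count, emote_count
-- ===== SOURCE B (Python) =====
-- emote_feelings = [
--     ("awesome", "Pog"), ("awesome", "PogU"), ("awesome", "POGGERS"), ("awesome", "PogChamp"),
--     ("funny", "LULW"), ("funny", "LUL"), ("funny", "OMEGALUL"), ("funny", "DuckerZ"),
--     ("sad", "PepeHands"), ("sad", "FeelsBadMan"),
--     ("cringe", "haHAA"),
--     ("racial", "Trihard"), ("racial", "KKona"),
--     ("scary", "monkaS"), ("scary", "monkaW"),
--     ("sexy", "gachi"), ("sexy", "kreyGASM")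
-- ]
--
-- def categorize_messages(message_list):
--     # one flat pass: frequency table of every stripped word, in first-occurrence order
--     words = [w.strip() for msg in message_list for w in msg[1].split(' ')]
--     emote_count = {}
--     for w in words:
--         emote_count[w] = emote_count.get(w, 0) + 1
--     # aggregate categories over DISTINCT words only, via an emote -> category index
--     emote_to_cat = {emote: cat for cat, emote in emote_feelings}
--     emote_category_count = {}
--     for w, c in emote_count.items():
--         cat = emote_to_cat.get(w, "Other")
--         emote_category_count[cat] = emote_category_count.get(cat, 0) + c
--     return emote_category_count, emote_count
-- ===== Notes on version B (the rewrite author's own statement) =====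
-- stated objective: alternative
-- what changed: Instead of scanning the 17-entry emote_feelings list linearly for every word occurrence and counting per occurrence, B builds a word-frequency table in one flat pass and then aggregates category totals over the distinct words only, via a precomputed emote-to-category dict.
import Mathlib
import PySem

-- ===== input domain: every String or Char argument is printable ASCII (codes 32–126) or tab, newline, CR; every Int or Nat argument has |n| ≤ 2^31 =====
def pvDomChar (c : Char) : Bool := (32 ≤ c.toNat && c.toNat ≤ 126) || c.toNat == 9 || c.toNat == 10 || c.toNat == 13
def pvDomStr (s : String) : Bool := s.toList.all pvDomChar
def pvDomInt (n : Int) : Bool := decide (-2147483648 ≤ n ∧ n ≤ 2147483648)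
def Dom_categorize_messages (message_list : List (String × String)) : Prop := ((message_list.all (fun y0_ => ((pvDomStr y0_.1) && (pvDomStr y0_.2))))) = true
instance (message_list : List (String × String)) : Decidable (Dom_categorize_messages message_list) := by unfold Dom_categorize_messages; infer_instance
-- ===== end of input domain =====

-- B replaces A's per-occurrence linear scan of emote_feelings by a one-pass word-frequency
-- table followed by aggregation over distinct words through a precomputed emote->category dict.


-- module-level constant shared by both Pythons
def pvEmoteFeelings : List (String × String) :=
  [("awesome", "Pog"), ("awesome", "PogU"), ("awesome", "POGGERS"), ("awesome", "PogChamp"),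
   ("funny", "LULW"), ("funny", "LUL"), ("funny", "OMEGALUL"), ("funny", "DuckerZ"),
   ("sad", "PepeHands"), ("sad", "FeelsBadMan"),
   ("cringe", "haHAA"),
   ("racial", "Trihard"), ("racial", "KKona"),
   ("scary", "monkaS"), ("scary", "monkaW"),
   ("sexy", "gachi"), ("sexy", "kreyGASM")]

-- msg[1].split(' '): PySem.Str.split? is none only for sep = "", so .getD [] is exact here
def pvSplit (s : String) : List String := (PySem.Str.split? s " ").getD []

-- ===== PORT A =====
-- the inner 'for index, emote in enumerate(emote_feelings)' loop with its break /
-- 'elif index == len(emote_feelings) - 1' last-entry check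
def pvScanA (word : String) (cd wd : PySem.Dict String Int) :
    List (String × String) → PySem.Dict String Int × PySem.Dict String Int
  | [] => (cd, wd)
  | [emote] =>
      if emote.2 == word then
        (cd.insert emote.1 (cd.getD emote.1 0 + 1), wd.insert emote.2 (wd.getD emote.2 0 + 1))
      else
        (cd.insert "Other" (cd.getD "Other" 0 + 1), wd.insert word (wd.getD word 0 + 1))
  | emote :: e2 :: rest =>
      if emote.2 == word then
        (cd.insert emote.1 (cd.getD emote.1 0 + 1), wd.insert emote.2 (wd.getD emote.2 0 + 1))
      else
        pvScanA word cd wd (e2 :: rest)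

def categorize_messages (message_list : List (String × String)) :
    (List (String × Int)) × (List (String × Int)) :=
  let st := message_list.foldl (fun st msg =>
      (pvSplit msg.2).foldl (fun st w =>
        pvScanA (PySem.Str.strip w) st.1 st.2 pvEmoteFeelings) st)
    (PySem.Dict.empty, PySem.Dict.empty)
  (st.1.items, st.2.items)

-- ===== PORT B =====
def categorize_messages_alt (message_list : List (String × String)) :
    (List (String × Int)) × (List (String × Int)) :=
  let words := message_list.flatMap (fun msg => (pvSplit msg.2).map PySem.Str.strip)
  let emote_count := words.foldl (fun d w => d.insert w (d.getD w 0 + 1)) PySem.Dict.empty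
  let emote_to_cat := pvEmoteFeelings.foldl (fun d p => d.insert p.2 p.1) PySem.Dict.empty
  let cat_count := emote_count.items.foldl (fun d p =>
      d.insert (emote_to_cat.getD p.1 "Other")
        (d.getD (emote_to_cat.getD p.1 "Other") 0 + p.2)) PySem.Dict.empty
  (cat_count.items, emote_count.items)

-- ===== PRECONDITION & SPEC =====
def Spec_categorize_messages (message_list : List (String × String)) (out : (List (String × Int)) × (List (String × Int))) : Prop := out = categorize_messages_alt message_list
instance (message_list : List (String × String)) (out : (List (String × Int)) × (List (String × Int))) : Decidable (Spec_categorize_messages message_list out) := by unfold Spec_categorize_messages; infer_instance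

-- ===== CLAIM (what is proved, stated in full; the proofs are below) =====
def Claim_equal_categorize_messages : Prop := ∀ (message_list : List (String × String)), Dom_categorize_messages message_list → Spec_categorize_messages message_list (categorize_messages message_list)

-- ===== LEMMAS AND PROOFS =====

-- the category A's scan assigns to a stripped word: first matching emote, else "Other"
def pvCat (w : String) : String :=
  ((pvEmoteFeelings.find? (fun e => e.2 == w)).map (·.1)).getD "Other"

-- the flat word stream both programs process
def pvWords (message_list : List (String × String)) : List String :=
  message_list.flatMap (fun msg => (pvSplit msg.2).map PySem.Str.strip)

-- A's inner scan = one category increment + one word increment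
theorem pvScanA_eq (word : String) (cd wd : PySem.Dict String Int)
    (l : List (String × String)) (hl : l ≠ []) :
    pvScanA word cd wd l =
      (cd.insert (((l.find? (fun e => e.2 == word)).map (·.1)).getD "Other")
         (cd.getD (((l.find? (fun e => e.2 == word)).map (·.1)).getD "Other") 0 + 1),
       wd.insert word (wd.getD word 0 + 1)) := by
  induction l generalizing cd wd with
  | nil => exact absurd rfl hl
  | cons e rest ih =>
    cases rest with
    | nil =>
      by_cases h : e.2 = word
      · simp [pvScanA, h]
      · simp [pvScanA, h]
    | cons e2 rest2 =>
      by_cases h : e.2 = word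
      · simp [pvScanA, h]
      · simp only [pvScanA, List.find?_cons, show (e.2 == word) = false by simp [h]]
        exact ih cd wd (by simp)

-- A = the flat per-word fold over pvWords (pair split componentwise)
theorem pvA_flat (message_list : List (String × String)) :
    categorize_messages message_list =
      (((pvWords message_list).foldl
          (fun d w => d.insert (pvCat w) (d.getD (pvCat w) 0 + 1)) PySem.Dict.empty).items,
       ((pvWords message_list).foldl
          (fun d w => d.insert w (d.getD w 0 + 1)) PySem.Dict.empty).items) := by
  have hfun : (fun (st : PySem.Dict String Int × PySem.Dict String Int) (w : String) =>
        pvScanA (PySem.Str.strip w) st.1 st.2 pvEmoteFeelings)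
      = (fun st w =>
          (st.1.insert (pvCat (PySem.Str.strip w)) (st.1.getD (pvCat (PySem.Str.strip w)) 0 + 1),
           st.2.insert (PySem.Str.strip w) (st.2.getD (PySem.Str.strip w) 0 + 1))) := by
    funext st w
    exact pvScanA_eq (PySem.Str.strip w) st.1 st.2 pvEmoteFeelings (by simp [pvEmoteFeelings])
  have key : message_list.foldl (fun st msg =>
        (pvSplit msg.2).foldl (fun st w =>
          pvScanA (PySem.Str.strip w) st.1 st.2 pvEmoteFeelings) st)
        (PySem.Dict.empty, PySem.Dict.empty)
      = ((pvWords message_list).foldl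
           (fun d w => d.insert (pvCat w) (d.getD (pvCat w) 0 + 1)) PySem.Dict.empty,
         (pvWords message_list).foldl
           (fun d w => d.insert w (d.getD w 0 + 1)) PySem.Dict.empty) := by
    rw [← PySem.List.foldl_prod_mk]
    rw [pvWords, List.foldl_flatMap]
    have hbody : (fun (st : PySem.Dict String Int × PySem.Dict String Int) msg =>
          (pvSplit msg.2).foldl (fun st w =>
            pvScanA (PySem.Str.strip w) st.1 st.2 pvEmoteFeelings) st)
        = (fun (st : PySem.Dict String Int × PySem.Dict String Int)
            (msg : String × String) =>
            ((pvSplit msg.2).map PySem.Str.strip).foldl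
              (fun s e => (s.1.insert (pvCat e) (s.1.getD (pvCat e) 0 + 1),
                           s.2.insert e (s.2.getD e 0 + 1))) st) := by
      funext st msg
      rw [List.foldl_map, hfun]
    rw [hbody]
  simp only [categorize_messages, key]

-- B's lookup dict agrees with A's first-match scan
theorem pvLookup_eq_pvCat (w : String) :
    (pvEmoteFeelings.foldl (fun d p => d.insert p.2 p.1) PySem.Dict.empty).getD w "Other"
      = pvCat w := by
  have hd : pvEmoteFeelings.foldl (fun d p => d.insert p.2 p.1) PySem.Dict.empty
      = PySem.Dict.mk (pvEmoteFeelings.map Prod.swap) := by decide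
  rw [hd]
  simp only [PySem.Dict.getD, PySem.Dict.get?, List.find?_map, Option.map_map, pvCat]
  rfl

-- value of a keyed insert-and-add fold
theorem pvGetD_fold_insert_add (g : String → String) (l : List (String × Int))
    (d : PySem.Dict String Int) (c : String) :
    (l.foldl (fun d p => d.insert (g p.1) (d.getD (g p.1) 0 + p.2)) d).getD c 0
      = d.getD c 0 + ((l.filter (fun p => g p.1 == c)).map (·.2)).sum := by
  induction l generalizing d with
  | nil => simp
  | cons a l ih =>
    by_cases h : g a.1 = c
    · simp only [List.foldl_cons, ih, List.filter_cons, h, PySem.Dict.getD_insert]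
      simp
      ring
    · simp only [List.foldl_cons, ih, List.filter_cons, show (g a.1 == c) = false by simp [h],
        PySem.Dict.getD_insert, if_neg (Ne.symm h)]
      simp

-- dedup commutes with mapping before dedup
theorem pvOfList_map_ofList (g : String → String) (ws : List String) :
    PySem.Set.ofList ((PySem.Set.ofList ws).map g) = PySem.Set.ofList (ws.map g) := by
  induction ws using List.reverseRecOn with
  | nil => rfl
  | append_singleton ws w ih =>
    by_cases h : w ∈ ws
    · rw [PySem.Set.ofList_append_singleton,
        PySem.Set.add_of_mem (by simp [PySem.Set.mem_ofList, h]),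
        ih, List.map_append, List.map_singleton, PySem.Set.ofList_append_singleton,
        PySem.Set.add_of_mem (by rw [PySem.Set.mem_ofList, List.mem_map]; exact ⟨w, h, rfl⟩)]
    · rw [PySem.Set.ofList_append_singleton,
        PySem.Set.add_of_not_mem (by simp [PySem.Set.mem_ofList, h]),
        List.map_append, List.map_singleton, PySem.Set.ofList_append_singleton, ih,
        List.map_append, List.map_singleton, PySem.Set.ofList_append_singleton]

-- summing full-list multiplicities over the distinct words of a class = class size
theorem pvSum_counts (ws : List String) (p : String → Bool) :
    (((PySem.List.dedup ws).filter p).map (fun x => ws.count x)).sum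
      = (ws.filter p).length := by
  have hnd : ((PySem.List.dedup ws).filter p).Nodup :=
    List.Nodup.filter _ (PySem.Set.nodup_ofList ws)
  rw [← List.sum_toFinset _ hnd]
  have hfin : ((PySem.List.dedup ws).filter p).toFinset = (ws.filter p).toFinset := by
    ext x
    simp [PySem.List.dedup, PySem.Set.mem_ofList]
  rw [hfin]
  have hcnt : ∀ x ∈ (ws.filter p).toFinset, ws.count x = (ws.filter p).count x := by
    intro x hx
    simp only [List.mem_toFinset, List.mem_filter] at hx
    rw [List.count_filter hx.2]
  rw [Finset.sum_congr rfl hcnt]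
  simpa using Multiset.toFinset_sum_count_eq (ws.filter p : Multiset String)

-- main grouping lemma: aggregating counter items through g = counter of the mapped stream
theorem pvGroup (g : String → String) (ws : List String) :
    ((PySem.Dict.counter ws).items.foldl
        (fun d p => d.insert (g p.1) (d.getD (g p.1) 0 + p.2)) PySem.Dict.empty)
      = PySem.Dict.counter (ws.map g) := by
  have nd1 : ((PySem.Dict.counter ws).items.foldl
      (fun d p => d.insert (g p.1) (d.getD (g p.1) 0 + p.2)) PySem.Dict.empty).keys.Nodup :=
    PySem.Dict.nodup_keys_foldl_insert_key _ (fun p : String × Int => g p.1) _ _ (by simp [PySem.Dict.keys_empty])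
  have nd2 := PySem.Dict.nodup_keys_counter (ws.map g)
  apply PySem.Dict.ext
  rw [PySem.Dict.items_eq_map_keys _ nd1 0, PySem.Dict.items_eq_map_keys _ nd2 0]
  have hkeys : ((PySem.Dict.counter ws).items.foldl
      (fun d p => d.insert (g p.1) (d.getD (g p.1) 0 + p.2)) PySem.Dict.empty).keys
      = (PySem.Dict.counter (ws.map g)).keys := by
    rw [PySem.Dict.keys_foldl_insert_key, PySem.Dict.keys_empty, PySem.Dict.keys_counter,
      PySem.Dict.items_counter, List.map_map]
    have : ((fun p : String × Int => g p.1) ∘ fun k => (k, (ws.count k : Int))) = g := rfl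
    rw [this, show (PySem.Set.update [] ((PySem.Set.ofList ws).map g) : List String)
        = PySem.Set.ofList ((PySem.Set.ofList ws).map g) from PySem.Set.update_empty _]
    exact pvOfList_map_ofList g ws
  rw [hkeys]
  refine List.map_congr_left (fun k _ => ?_)
  have hval : ((PySem.Dict.counter ws).items.foldl
      (fun d p => d.insert (g p.1) (d.getD (g p.1) 0 + p.2)) PySem.Dict.empty).getD k 0
      = (PySem.Dict.counter (ws.map g)).getD k 0 := by
    rw [pvGetD_fold_insert_add, PySem.Dict.getD_empty, PySem.Dict.getD_counter,
      PySem.Dict.items_counter, List.filter_map, List.map_map]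
    have hc : ((fun p : String × Int => g p.1 == k) ∘ fun x => (x, (ws.count x : Int)))
        = fun x => g x == k := rfl
    have hm : ((fun p : String × Int => p.2) ∘ fun x => (x, (ws.count x : Int)))
        = fun x => ((ws.count x : Nat) : Int) := rfl
    rw [hc, hm]
    have h2 : ((((PySem.Set.ofList ws).filter (fun x => g x == k)).map
          (fun x => ((ws.count x : Nat) : Int)))).sum
        = (((((PySem.Set.ofList ws).filter (fun x => g x == k)).map
            (fun x => ws.count x))).sum : Int) := by
      rw [Nat.cast_list_sum, List.map_map]; rfl
    rw [h2, show (PySem.Set.ofList ws : List String) = PySem.List.dedup ws from rfl,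
      pvSum_counts ws (fun x => g x == k)]
    rw [List.count_eq_countP, List.countP_map, List.countP_eq_length_filter]
    simp only [Function.comp_def]
    omega
  rw [hval]

-- ===== VERDICT (by name: the statement is the Claim_ definition above) =====
theorem categorize_messages_spec : Claim_equal_categorize_messages := by
  intro ml _
  show categorize_messages ml = categorize_messages_alt ml
  rw [pvA_flat]
  simp only [categorize_messages_alt, pvLookup_eq_pvCat]
  rw [show ml.flatMap (fun msg => (pvSplit msg.2).map PySem.Str.strip) = pvWords ml from rfl]
  rw [PySem.Dict.foldl_insert_getD_add_one_eq_counter, pvGroup pvCat (pvWords ml)]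
  have hA : (pvWords ml).foldl (fun d w => d.insert (pvCat w) (d.getD (pvCat w) 0 + 1))
      PySem.Dict.empty = PySem.Dict.counter ((pvWords ml).map pvCat) := by
    rw [← PySem.Dict.foldl_insert_getD_add_one_eq_counter, List.foldl_map]
  rw [hA]
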